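-- pv_equiv track=rewrite | github.com/ezrashare21/brain-compiler | compile.py | removeNS
-- ===== SOURCE A (Python) =====
-- def removeNS(input_):
--     output_ = []
--     number = 0
--     num = 0
--
--     for x in input_:
--         num += 1
--
--         if num != len(input_):
--             number = 0
--             string = ""
--             while number != len(x) - 1:
--                 number += 1
--                 string = string + x[number - 1]
--             output_.append(string)
--         else:
--            output_.append(x)
--     return(output_)
-- ===== SOURCE B (Python) =====
-- def removeNS(input_):
--     # Head/tail split: strip all-but-last elements by slicing, keep the last whole.
--     if not input_:
--         return []
--     return [x[:-1] for x in input_[:-1]] + [input_[-1]]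
-- ===== Notes on version B (the rewrite author's own statement) =====
-- stated objective: simpler
-- what changed: B splits the list structurally into all-but-last (each stripped via the x[:-1] slice) and the last element kept whole, removing A's per-element position counter, last-element branch and hand-written character-by-character string concatenation loop (quadratic in element length).
import Mathlib
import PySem

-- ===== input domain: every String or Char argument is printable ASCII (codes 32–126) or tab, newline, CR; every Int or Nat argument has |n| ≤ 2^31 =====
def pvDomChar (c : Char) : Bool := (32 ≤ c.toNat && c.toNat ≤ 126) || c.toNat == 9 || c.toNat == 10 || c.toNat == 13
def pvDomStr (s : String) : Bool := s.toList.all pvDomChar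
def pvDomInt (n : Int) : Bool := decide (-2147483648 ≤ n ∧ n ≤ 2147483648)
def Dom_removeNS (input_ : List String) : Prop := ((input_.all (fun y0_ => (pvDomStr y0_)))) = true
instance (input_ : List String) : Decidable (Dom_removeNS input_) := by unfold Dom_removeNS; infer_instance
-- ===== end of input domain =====

-- B strips all-but-last elements via slicing and keeps the last whole (head/tail split),
-- replacing A's position counter, in-loop last-element branch and char-copy while loop.


-- ===== PORT A =====
-- the inner while loop: `while number != len(x) - 1: number += 1; string = string + x[number-1]`
-- (appended char is x[number] for the pre-increment number). For x = "" Python indexes ""[0]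
-- and raises IndexError; those inputs are outside Pre_, and the guard `number ≥ len-1`
-- merely makes the recursion total there.
def pvStripLoop (cs : List Char) (number : Nat) (string : List Char) : List Char :=
  if number ≥ cs.length - 1 then string
  else pvStripLoop cs (number + 1) (string ++ [cs.getD number ' '])
termination_by cs.length - 1 - number

def pvGoA (n : Nat) : List String → Nat → List String → List String
  | [], _, output_ => output_
  | x :: rest, num, output_ =>
    let num' := num + 1
    if num' ≠ n then pvGoA n rest num' (output_ ++ [String.ofList (pvStripLoop x.toList 0 [])])
    else pvGoA n rest num' (output_ ++ [x])

def removeNS (input_ : List String) : List String :=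
  pvGoA input_.length input_ 0 []

-- ===== PORT B =====
def removeNS_alt (input_ : List String) : List String :=
  match input_ with
  | [] => []
  | x :: xs =>
    ((x :: xs).dropLast.map (fun y => String.ofList (PySem.List.slice y.toList none (some (-1)))))
      ++ [(x :: xs).getLast (by simp)]

-- ===== PRECONDITION & SPEC =====
-- Pre_ excludes exactly the inputs on which A raises IndexError (its while loop
-- indexes ""[0] when an element before the last is the empty string).
def Pre_removeNS (input_ : List String) : Prop := ∀ x ∈ input_.dropLast, x ≠ ""
instance (input_ : List String) : Decidable (Pre_removeNS input_) := by unfold Pre_removeNS; infer_instance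
def pvWitness_removeNS : List String := ["ab", "c", "xy"]


def Spec_removeNS (input_ : List String) (out : List String) : Prop := out = removeNS_alt input_
instance (input_ : List String) (out : List String) : Decidable (Spec_removeNS input_ out) := by unfold Spec_removeNS; infer_instance

-- ===== CLAIM (what is proved, stated in full; the proofs are below) =====
def Claim_equal_removeNS : Prop := ∀ (input_ : List String), Dom_removeNS input_ → Pre_removeNS input_ → Spec_removeNS input_ (removeNS input_)

-- ===== LEMMAS AND PROOFS =====

-- the while loop copies cs[number], cs[number+1], …, cs[len-2]
theorem pvStripLoop_eq (cs : List Char) (number : Nat) (string : List Char) :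
    pvStripLoop cs number string = string ++ ((cs.take (cs.length - 1)).drop number) := by
  fun_induction pvStripLoop cs number string with
  | case1 number string h =>
    have : (cs.take (cs.length - 1)).drop number = [] := by
      apply List.drop_eq_nil_of_le
      simp; omega
    simp [this]
  | case2 number string h ih =>
    rw [ih]
    have hlt : number < cs.length - 1 := by omega
    have : (cs.take (cs.length - 1)).drop number
        = cs.getD number ' ' :: ((cs.take (cs.length - 1)).drop (number + 1)) := by
      rw [List.drop_eq_getElem_cons (by simp; omega)]
      congr 1
      rw [List.getElem_take]
      simp [List.getD_eq_getElem?_getD, List.getElem?_eq_getElem (by omega : number < cs.length)]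
    simp [this]

theorem pvStrip_eq_dropLast (s : String) :
    String.ofList (pvStripLoop s.toList 0 []) = String.ofList s.toList.dropLast := by
  rw [pvStripLoop_eq, List.dropLast_eq_take]
  simp

theorem pvGoA_eq (rest : List String) : ∀ (n num : Nat) (output_ : List String)
    (hrest : rest ≠ []) (hn : num + rest.length = n),
    pvGoA n rest num output_
      = output_ ++ rest.dropLast.map (fun y => String.ofList y.toList.dropLast)
          ++ [rest.getLast hrest] := by
  induction rest with
  | nil => intro _ _ _ h _; exact absurd rfl h
  | cons x rest ih =>
    intro n num output_ _ hn
    by_cases hr : rest = []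
    · subst hr
      have : num + 1 = n := by simpa using hn
      simp [pvGoA, this]
    · have hne : num + 1 ≠ n := by
        have : rest.length ≠ 0 := by simpa using List.length_eq_zero_iff.not.mpr hr
        simp at hn ⊢; omega
      rw [show pvGoA n (x :: rest) num output_
          = pvGoA n rest (num + 1) (output_ ++ [String.ofList (pvStripLoop x.toList 0 [])]) by
        simp [pvGoA, hne]]
      rw [ih n (num + 1) _ hr (by simp at hn ⊢; omega)]
      rw [List.dropLast_cons_of_ne_nil hr, List.getLast_cons hr]
      simp [pvStrip_eq_dropLast]

-- ===== VERDICT (by name: the statement is the Claim_ definition above) =====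
theorem removeNS_spec : Claim_equal_removeNS := by
  intro input_ _ _
  unfold Spec_removeNS removeNS removeNS_alt
  match input_ with
  | [] => simp [pvGoA]
  | x :: xs =>
    rw [pvGoA_eq (x :: xs) (x :: xs).length 0 [] (by simp) (by simp)]
    simp [PySem.List.slice_to_neg_one]
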